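-- pv_equiv track=rewrite | github.com/judgeou/wd14-tagging-danbooru | dump-hentai-cosplay.py | has_nsfw_tag
-- ===== SOURCE A (Python) =====
-- def has_nsfw_tag (tag_arr: list[str]):
--    nsfw_tag_list = ['nipples', 'pussy', 'monochrome', 'female_pubic_hair', 'nude', 'penis']
--    for tag in tag_arr:
--       tag_s = tag.strip()
--       for nsfw_tag in nsfw_tag_list:
--          if tag_s == nsfw_tag:
--             return True
--
--    return False
-- ===== SOURCE B (Python) =====
-- NSFW_SORTED = sorted(['nipples', 'pussy', 'monochrome', 'female_pubic_hair', 'nude', 'penis'])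
--
-- def has_nsfw_tag(tag_arr: list[str]):
--     xs = sorted(t.strip() for t in tag_arr)
--     ys = NSFW_SORTED
--     i = j = 0
--     while i < len(xs) and j < len(ys):
--         if xs[i] == ys[j]:
--             return True
--         if xs[i] < ys[j]:
--             i += 1
--         else:
--             j += 1
--     return False
-- ===== Notes on version B (the rewrite author's own statement) =====
-- stated objective: alternative
-- what changed: Replaces A's nested per-tag scan with early return by sorting the stripped tags and detecting a common element with the NSFW list via a two-pointer merge over the two sorted lists.
import Mathlib
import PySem

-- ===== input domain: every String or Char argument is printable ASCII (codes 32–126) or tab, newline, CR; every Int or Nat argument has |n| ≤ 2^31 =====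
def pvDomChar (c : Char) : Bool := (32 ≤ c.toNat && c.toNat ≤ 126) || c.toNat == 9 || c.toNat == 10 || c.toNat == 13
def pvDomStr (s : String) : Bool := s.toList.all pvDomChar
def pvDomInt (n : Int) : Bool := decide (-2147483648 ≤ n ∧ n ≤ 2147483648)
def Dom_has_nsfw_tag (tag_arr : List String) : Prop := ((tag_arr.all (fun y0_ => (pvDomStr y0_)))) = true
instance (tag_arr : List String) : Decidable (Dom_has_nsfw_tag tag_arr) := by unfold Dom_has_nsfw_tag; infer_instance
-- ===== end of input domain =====

-- ===== PORT A =====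
def has_nsfw_tag (tag_arr : List String) : Bool :=
  -- for tag in tag_arr: for nsfw_tag in nsfw_tag_list: if tag.strip() == nsfw_tag: return True; return False
  tag_arr.any (fun tag =>
    (["nipples", "pussy", "monochrome", "female_pubic_hair", "nude", "penis"]).any
      (fun nsfw_tag => PySem.Str.strip tag == nsfw_tag))

-- ===== PORT B =====
-- B sorts the stripped tags and runs a two-pointer merge against the pre-sorted NSFW list.
def pvNsfwSorted : List String :=
  PySem.List.sorted ["nipples", "pussy", "monochrome", "female_pubic_hair", "nude", "penis"]
    (fun x => x) false

-- the while-loop over indices i, j, ported as structural recursion on the two suffixes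
def pvMerge : List String → List String → Bool
  | [], _ => false
  | _ :: _, [] => false
  | x :: xs, y :: ys =>
    if x == y then true
    else if x < y then pvMerge xs (y :: ys)
    else pvMerge (x :: xs) ys

def has_nsfw_tag_alt (tag_arr : List String) : Bool :=
  pvMerge (PySem.List.sorted (tag_arr.map PySem.Str.strip) (fun x => x) false) pvNsfwSorted

-- ===== PRECONDITION & SPEC =====
def Spec_has_nsfw_tag (tag_arr : List String) (out : Bool) : Prop := out = has_nsfw_tag_alt tag_arr
instance (tag_arr : List String) (out : Bool) : Decidable (Spec_has_nsfw_tag tag_arr out) := by unfold Spec_has_nsfw_tag; infer_instance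

-- ===== CLAIM (what is proved, stated in full; the proofs are below) =====
def Claim_equal_has_nsfw_tag : Prop := ∀ (tag_arr : List String), Dom_has_nsfw_tag tag_arr → Spec_has_nsfw_tag tag_arr (has_nsfw_tag tag_arr)

-- ===== LEMMAS AND PROOFS =====
-- On sorted lists, the two-pointer merge detects exactly the existence of a common element.
theorem pvMerge_iff (xs ys : List String)
    (hx : xs.Pairwise (· ≤ ·)) (hy : ys.Pairwise (· ≤ ·)) :
    pvMerge xs ys = true ↔ ∃ a, a ∈ xs ∧ a ∈ ys := by
  revert hx hy
  induction xs, ys using pvMerge.induct with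
  | case1 ys => simp [pvMerge]
  | case2 x xs => simp [pvMerge]
  | case3 x xs y ys hxy =>
    intro _ _
    have hxy' : x = y := by simpa using hxy
    simp only [pvMerge, hxy, if_true, true_iff]
    exact ⟨x, List.mem_cons_self .., by simp [hxy']⟩
  | case4 x xs y ys hxy hlt ih =>
    intro hx hy
    rw [pvMerge, if_neg hxy, if_pos hlt]
    rw [ih hx.tail hy]
    constructor
    · rintro ⟨a, ha, hb⟩; exact ⟨a, List.mem_cons_of_mem _ ha, hb⟩
    · rintro ⟨a, ha, hb⟩
      rcases List.mem_cons.mp ha with rfl | ha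
      · exfalso
        rcases List.mem_cons.mp hb with rfl | hb
        · simp at hxy
        · exact absurd ((List.pairwise_cons.mp hy).1 a hb) (not_le_of_gt hlt)
      · exact ⟨a, ha, hb⟩
  | case5 x xs y ys hxy hlt ih =>
    intro hx hy
    rw [pvMerge, if_neg hxy, if_neg hlt]
    rw [ih hx hy.tail]
    have hyx : y < x :=
      lt_of_le_of_ne (not_lt.mp hlt) (fun h => (show x ≠ y by simpa using hxy) h.symm)
    constructor
    · rintro ⟨a, ha, hb⟩; exact ⟨a, ha, List.mem_cons_of_mem _ hb⟩
    · rintro ⟨a, ha, hb⟩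
      rcases List.mem_cons.mp hb with rfl | hb
      · exfalso
        rcases List.mem_cons.mp ha with rfl | ha
        · simp at hxy
        · exact absurd ((List.pairwise_cons.mp hx).1 a ha) (not_le_of_gt hyx)
      · exact ⟨a, ha, hb⟩

-- ===== VERDICT (by name: the statement is the Claim_ definition above) =====
theorem has_nsfw_tag_spec : Claim_equal_has_nsfw_tag := by
  intro tag_arr _
  unfold Spec_has_nsfw_tag has_nsfw_tag has_nsfw_tag_alt pvNsfwSorted
  rw [Bool.eq_iff_iff,
    pvMerge_iff _ _ (PySem.List.sorted_pairwise _ _) (PySem.List.sorted_pairwise _ _)]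
  simp only [List.any_eq_true, PySem.List.mem_sorted, List.mem_map, beq_iff_eq]
  constructor
  · rintro ⟨t, ht, n, hn, he⟩
    exact ⟨n, ⟨t, ht, he⟩, hn⟩
  · rintro ⟨a, ⟨t, ht, he⟩, hn⟩
    exact ⟨t, ht, a, hn, he⟩
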